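-- pv_equiv track=rewrite | github.com/N-Orien/EmoST | GER/scripts/remove_repetition2.py | remove_repetitive_text
-- ===== SOURCE A (Python) =====
-- def remove_repetitive_text(text):
--     def find_earliest_ending_repeating_sequence(s):
--         length = len(s)
--         earliest_end = float('inf')
--         best_seq_end = None
--
--         for i in range(length // 3, length // 2 + 1):  # Checking for different lengths of sequences
--             for j in range(length - 2 * i + 1):  # Checking each possible starting position
--                 seq = s[j:j + i]
--                 if s[j + i:j + 2 * i] == seq:
--                     end_point = j + 2 * i
--                     if end_point < earliest_end:
--                         earliest_end = end_point
--                         best_seq_end = j + i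
--                         break  # No need to check further sequences at this length once a match is found
--
--         return best_seq_end
--
--     result = find_earliest_ending_repeating_sequence(text)
--     if result is not None:
--         return text[:result]
--     return text
-- ===== SOURCE B (Python) =====
-- def remove_repetitive_text(text):
--     # End-point-ascending search: scan candidate end positions E from the
--     # smallest feasible one upward; at each E try unit lengths i ascending,
--     # j = E - 2*i, and cut at the first adjacent repeat found.
--     n = len(text)
--     lo = max(1, n // 3)
--     hi = n // 2
--     for E in range(2 * lo, n + 1):
--         for i in range(lo, hi + 1):
--             j = E - 2 * i
--             if j >= 0 and text[j:j + i] == text[j + i:j + 2 * i]: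
--                 return text[:E - i]
--     return text
-- ===== Notes on version B (the rewrite author's own statement) =====
-- stated objective: alternative
-- what changed: Search is reorganized from A's unit-length-outer scan with a running minimum end point into an end-point-ascending lexicographic search (end E outer, unit length i inner) that returns on the first hit, so no best-so-far state is kept.
-- intended difference: On strings of length 1 or 2 A's unit-length range starts at 0, so the empty substring trivially repeats at position 0 and A returns the empty string; B only considers unit lengths of at least 1 and returns the text itself (or its first character for a doubled pair), which is the intended truncation behaviour. — e.g. on remove_repetitive_text("aa"): A returns "", B returns "a"
import Mathlib
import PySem

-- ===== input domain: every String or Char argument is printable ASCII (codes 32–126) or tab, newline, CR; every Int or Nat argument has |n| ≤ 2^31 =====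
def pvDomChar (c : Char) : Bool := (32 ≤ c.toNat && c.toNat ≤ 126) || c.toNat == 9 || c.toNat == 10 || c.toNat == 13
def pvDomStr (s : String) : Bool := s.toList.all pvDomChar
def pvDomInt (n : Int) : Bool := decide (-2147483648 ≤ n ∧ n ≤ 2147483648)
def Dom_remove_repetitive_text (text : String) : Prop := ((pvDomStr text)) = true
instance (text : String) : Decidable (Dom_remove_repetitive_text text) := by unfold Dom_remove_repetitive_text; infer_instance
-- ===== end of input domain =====

-- B reorganizes A's minimum-end-point search into an end-point-ascending lexicographic
-- search returning on the first hit (objective: alternative); on strings of length 1 or 2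
-- A's degenerate unit length 0 makes it return the empty string while B returns the intended value (D_).

-- ===== PORT A =====
-- All indices A manipulates are nonnegative, so the port runs on Nat: s[j:j+i] is
-- (cs.drop j).take i (exact by PySem.List.slice_natCast_add), range(a, b) is
-- List.range' a (b - a), and Python's floor division n // k on nonnegative n is Nat '/'.
-- 'earliest_end = inf' is the state none; 'end_point < earliest_end' is pvLtA.

def pvLtA (e : Nat) : Option Nat → Bool
  | none => true          -- anything < float('inf')
  | some m => e < m

-- the inner 'for j in range(length - 2*i + 1)' with its conditional break
def pvInnerA (cs : List Char) (i : Nat) : List Nat → (Option Nat × Option Nat) → (Option Nat × Option Nat)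
  | [], st => st
  | j :: js, st =>
    if (cs.drop j).take i = (cs.drop (j + i)).take i then
      if pvLtA (j + 2 * i) st.1 then (some (j + 2 * i), some (j + i))  -- break
      else pvInnerA cs i js st
    else pvInnerA cs i js st

def remove_repetitive_text (text : String) : String :=
  let cs := text.toList
  let n := cs.length
  let st := (List.range' (n / 3) (n / 2 + 1 - n / 3)).foldl
      (fun st i => pvInnerA cs i (List.range (n - 2 * i + 1)) st) (none, none)
  match st.2 with
  | some r => String.ofList (cs.take r)   -- text[:result]
  | none => text

-- ===== PORT B =====
-- literal port of Source B on the same Nat conventions; 'j = E - 2*i; j >= 0 and …'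
-- becomes the guard 2*i ≤ E followed by the slice comparison at j = E - 2*i.

def pvFindIB (cs : List Char) (E : Nat) : List Nat → Option Nat
  | [] => none
  | i :: is =>
    if 2 * i ≤ E ∧ (cs.drop (E - 2 * i)).take i = (cs.drop (E - 2 * i + i)).take i
    then some (E - i)
    else pvFindIB cs E is

def pvFindEB (cs : List Char) (irange : List Nat) : List Nat → Option Nat
  | [] => none
  | E :: Es =>
    match pvFindIB cs E irange with
    | some r => some r
    | none => pvFindEB cs irange Es

def remove_repetitive_text_alt (text : String) : String :=
  let cs := text.toList
  let n := cs.length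
  let lo := max 1 (n / 3)
  let hi := n / 2
  match pvFindEB cs (List.range' lo (hi + 1 - lo)) (List.range' (2 * lo) (n + 1 - 2 * lo)) with
  | some r => String.ofList (cs.take r)   -- text[:E - i]
  | none => text

-- ===== PRECONDITION & SPEC =====
-- On strings of length 1 or 2 A's unit-length range starts at 0, so the empty substring
-- trivially repeats at position 0 and A returns the empty string; B only considers unit
-- lengths of at least 1 and returns the text itself (or its first character for a doubled
-- pair), the intended truncation.
def D_remove_repetitive_text (text : String) : Prop :=
  PySem.Str.len text = 1 ∨ PySem.Str.len text = 2
instance (text : String) : Decidable (D_remove_repetitive_text text) := by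
  unfold D_remove_repetitive_text; infer_instance

def Spec_remove_repetitive_text (text : String) (out : String) : Prop :=
  ¬ D_remove_repetitive_text text → out = remove_repetitive_text_alt text
instance (text : String) (out : String) : Decidable (Spec_remove_repetitive_text text out) := by
  unfold Spec_remove_repetitive_text; infer_instance

def pvDiffWitness_remove_repetitive_text : String := "aa"
def pvDiffWitnessOut_remove_repetitive_text : String × String := ("", "a")

-- ===== CLAIM (what is proved, stated in full; the proofs are below) =====
def Claim_unchanged_remove_repetitive_text : Prop := ∀ (text : String), Dom_remove_repetitive_text text → Spec_remove_repetitive_text text (remove_repetitive_text text)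
def Claim_changed_remove_repetitive_text : Prop := Dom_remove_repetitive_text (pvDiffWitness_remove_repetitive_text) ∧ D_remove_repetitive_text (pvDiffWitness_remove_repetitive_text) ∧ remove_repetitive_text (pvDiffWitness_remove_repetitive_text) = pvDiffWitnessOut_remove_repetitive_text.1 ∧ remove_repetitive_text_alt (pvDiffWitness_remove_repetitive_text) = pvDiffWitnessOut_remove_repetitive_text.2 ∧ pvDiffWitnessOut_remove_repetitive_text.1 ≠ pvDiffWitnessOut_remove_repetitive_text.2
def Claim_exact_remove_repetitive_text : Prop := ∀ (text : String), Dom_remove_repetitive_text text → D_remove_repetitive_text text → remove_repetitive_text text ≠ remove_repetitive_text_alt text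

-- ===== LEMMAS AND PROOFS =====

-- abbreviations used only by the proofs
def pvPb (cs : List Char) (i j : Nat) : Bool := decide ((cs.drop j).take i = (cs.drop (j + i)).take i)

def pvValid (cs : List Char) (lo hi E i : Nat) : Prop :=
  lo ≤ i ∧ i ≤ hi ∧ 2 * i ≤ E ∧ E ≤ cs.length ∧ pvPb cs i (E - 2 * i) = true

-- first matching j for a given unit length i
def pvFirstJ (cs : List Char) (i : Nat) : Option Nat :=
  (List.range (cs.length - 2 * i + 1)).find? (fun j => pvPb cs i j)

-- the per-i candidate (end point, i)
def pvCand (cs : List Char) (L : List Nat) : List (Nat × Nat) :=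
  L.filterMap (fun i => (pvFirstJ cs i).map (fun j => (j + 2 * i, i)))

-- A's running strict minimum, stripped of the inner loop
def pvCombine (acc : Option (Nat × Nat)) (p : Nat × Nat) : Option (Nat × Nat) :=
  match acc with
  | none => some p
  | some q => if p.1 < q.1 then some p else acc

def pvPack : Option (Nat × Nat) → Option Nat × Option Nat
  | none => (none, none)
  | some (E, i) => (some E, some (E - i))

theorem pvInnerA_no_update (cs : List Char) (i : Nat) (js : List Nat) (st : Option Nat × Option Nat)
    (h : ∀ j ∈ js, pvLtA (j + 2 * i) st.1 = false) :
    pvInnerA cs i js st = st := by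
  induction js with
  | nil => rfl
  | cons j js ih =>
    have hj := h j (List.mem_cons_self)
    have ih' := ih (fun x hx => h x (List.mem_cons_of_mem _ hx))
    simp only [pvInnerA, hj]
    split <;> simp [ih']

theorem pvInnerA_char (cs : List Char) (i : Nat) (js : List Nat) (st : Option Nat × Option Nat)
    (hsort : js.Pairwise (· < ·)) :
    pvInnerA cs i js st =
      match js.find? (fun j => pvPb cs i j) with
      | some j => if pvLtA (j + 2 * i) st.1 then (some (j + 2 * i), some (j + i)) else st
      | none => st := by
  induction js with
  | nil => rfl
  | cons j js ih =>
    rcases List.pairwise_cons.mp hsort with ⟨hlt, hsort'⟩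
    by_cases hc : (cs.drop j).take i = (cs.drop (j + i)).take i
    · have hb : pvPb cs i j = true := by simp [pvPb, hc]
      rw [List.find?_cons_of_pos hb]
      simp only [pvInnerA, if_pos hc]
      by_cases hl : pvLtA (j + 2 * i) st.1 = true
      · simp [hl]
      · have hl' : pvLtA (j + 2 * i) st.1 = false := by
          cases hh : pvLtA (j + 2 * i) st.1 <;> simp_all
        rw [hl', if_neg (by decide)]
        apply pvInnerA_no_update
        intro j' hj'
        have hjj : j < j' := hlt j' hj'
        cases hst : st.1 with
        | none => simp [pvLtA, hst] at hl'
        | some m =>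
          simp [pvLtA, hst] at hl' ⊢
          omega
    · have hb : pvPb cs i j = false := by simp [pvPb, hc]
      rw [List.find?_cons_of_neg (by simp [hb])]
      simp only [pvInnerA, if_neg hc]
      exact ih hsort'

theorem pvStepA (cs : List Char) (i : Nat) (acc : Option (Nat × Nat)) :
    pvInnerA cs i (List.range (cs.length - 2 * i + 1)) (pvPack acc)
      = pvPack (match pvFirstJ cs i with
          | some j => pvCombine acc (j + 2 * i, i)
          | none => acc) := by
  rw [pvInnerA_char cs i _ _ (List.pairwise_lt_range)]
  unfold pvFirstJ
  cases hf : (List.range (cs.length - 2 * i + 1)).find? (fun j => pvPb cs i j) with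
  | none => rfl
  | some j =>
    cases acc with
    | none =>
      simp only [pvPack, pvLtA, pvCombine]
      have : j + 2 * i - i = j + i := by omega
      simp [this]
    | some q =>
      obtain ⟨E', i'⟩ := q
      simp only [pvPack, pvLtA, pvCombine]
      by_cases hlt : j + 2 * i < E'
      · rw [if_pos (by simpa using hlt), if_pos hlt]
        have : j + 2 * i - i = j + i := by omega
        simp [this]
      · rw [if_neg (by simpa using hlt), if_neg hlt]

theorem pvFold_eq_combine (cs : List Char) (L : List Nat) (acc : Option (Nat × Nat)) :
    L.foldl (fun st i => pvInnerA cs i (List.range (cs.length - 2 * i + 1)) st) (pvPack acc)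
      = pvPack ((pvCand cs L).foldl pvCombine acc) := by
  induction L generalizing acc with
  | nil => rfl
  | cons i L ih =>
    simp only [List.foldl_cons, pvCand, List.filterMap_cons]
    cases hf : pvFirstJ cs i with
    | none =>
      rw [pvStepA, hf]
      exact ih acc
    | some j =>
      rw [pvStepA, hf]
      simpa [pvCand] using ih (pvCombine acc (j + 2 * i, i))

theorem pvCombine_mem (ps : List (Nat × Nat)) (acc : Option (Nat × Nat)) (q : Nat × Nat)
    (h : ps.foldl pvCombine acc = some q) : q ∈ ps ∨ acc = some q := by
  induction ps generalizing acc with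
  | nil => exact Or.inr h
  | cons p ps ih =>
    rcases ih (pvCombine acc p) h with hq | hq
    · exact Or.inl (List.mem_cons_of_mem _ hq)
    · cases acc with
      | none =>
        simp only [pvCombine] at hq
        exact Or.inl (by simp [← Option.some_inj.mp hq])
      | some q' =>
        simp only [pvCombine] at hq
        split at hq
        · exact Or.inl (by simp [← Option.some_inj.mp hq])
        · exact Or.inr hq

theorem pvCombine_keep (ps : List (Nat × Nat)) (p : Nat × Nat)
    (h : ∀ q ∈ ps, p.1 ≤ q.1) : ps.foldl pvCombine (some p) = some p := by
  induction ps with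
  | nil => rfl
  | cons q ps ih =>
    have hq := h q (List.mem_cons_self)
    simp only [List.foldl_cons, pvCombine, if_neg (by omega : ¬ q.1 < p.1)]
    exact ih (fun r hr => h r (List.mem_cons_of_mem _ hr))

theorem pvCombine_first_min (as bs : List (Nat × Nat)) (p : Nat × Nat)
    (h1 : ∀ q ∈ as, p.1 < q.1) (h2 : ∀ q ∈ bs, p.1 ≤ q.1) :
    (as ++ p :: bs).foldl pvCombine none = some p := by
  rw [List.foldl_append, List.foldl_cons]
  have hmid : pvCombine (as.foldl pvCombine none) p = some p := by
    cases hr : as.foldl pvCombine none with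
    | none => rfl
    | some q =>
      rcases pvCombine_mem as none q hr with hq | hq
      · simp only [pvCombine, if_pos (h1 q hq)]
      · exact absurd hq (by simp)
  rw [hmid]
  exact pvCombine_keep bs p h2

theorem pvFindIB_eq_find? (cs : List Char) (E : Nat) (is : List Nat) :
    pvFindIB cs E is =
      (is.find? (fun i => decide (2 * i ≤ E ∧ (cs.drop (E - 2 * i)).take i = (cs.drop (E - 2 * i + i)).take i))).map
        (fun i => E - i) := by
  induction is with
  | nil => rfl
  | cons i is ih =>
    by_cases hc : 2 * i ≤ E ∧ (cs.drop (E - 2 * i)).take i = (cs.drop (E - 2 * i + i)).take i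
    · rw [List.find?_cons_of_pos (by simpa using hc)]
      simp only [pvFindIB, if_pos hc, Option.map_some]
    · rw [List.find?_cons_of_neg (by simpa using hc)]
      simp only [pvFindIB, if_neg hc]
      exact ih

theorem pvFindEB_eq_findSome? (cs : List Char) (irange Es : List Nat) :
    pvFindEB cs irange Es = Es.findSome? (fun E => pvFindIB cs E irange) := by
  induction Es with
  | nil => rfl
  | cons E Es ih =>
    simp only [pvFindEB, List.findSome?_cons]
    cases pvFindIB cs E irange with
    | some r => rfl
    | none => exact ih

theorem pvFind?_range'_eq_some {p : Nat → Bool} {a cnt i : Nat}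
    (hlo : a ≤ i) (hhi : i < a + cnt) (hp : p i = true)
    (hmin : ∀ k, a ≤ k → k < i → p k = false) :
    (List.range' a cnt).find? p = some i := by
  induction cnt generalizing a with
  | zero => omega
  | succ cnt ih =>
    rw [List.range'_succ]
    by_cases ha : a = i
    · subst ha; exact List.find?_cons_of_pos hp
    · have hai : a < i := by omega
      rw [List.find?_cons_of_neg (by simp [hmin a (le_refl a) hai])]
      exact ih (a := a + 1) (by omega) (by omega) (fun k hk1 hk2 => hmin k (by omega) hk2)

-- firstJ is minimal: any valid end for unit i bounds it
theorem pvFindSome?_range'_eq_some {α : Type} (f : Nat → Option α) {a cnt E : Nat} (r : α)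
    (hlo : a ≤ E) (hhi : E < a + cnt) (hE : f E = some r)
    (hmin : ∀ k, a ≤ k → k < E → f k = none) :
    (List.range' a cnt).findSome? f = some r := by
  induction cnt generalizing a with
  | zero => omega
  | succ cnt ih =>
    rw [List.range'_succ, List.findSome?_cons]
    by_cases ha : a = E
    · subst ha; rw [hE]
    · have hai : a < E := by omega
      rw [hmin a (le_refl a) hai]
      exact ih (a := a + 1) (by omega) (by omega) (fun k hk1 hk2 => hmin k (by omega) hk2)

theorem pvFirstJ_le (cs : List Char) (lo hi E i : Nat) (h : pvValid cs lo hi E i) :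
    ∃ j, pvFirstJ cs i = some j ∧ j + 2 * i ≤ E := by
  obtain ⟨h1, h2, h3, h4, h5⟩ := h
  have hex : ∃ j, pvPb cs i j = true := ⟨E - 2 * i, h5⟩
  have hfind : Nat.find hex ≤ E - 2 * i := Nat.find_min' hex h5
  refine ⟨Nat.find hex, ?_, by omega⟩
  unfold pvFirstJ
  rw [List.range_eq_range']
  apply pvFind?_range'_eq_some (Nat.zero_le _) (by omega) (Nat.find_spec hex)
  intro k _ hk
  simpa using Nat.find_min hex hk

-- a firstJ hit is a valid pair
theorem pvFirstJ_valid (cs : List Char) (lo hi i j : Nat) (h1 : lo ≤ i) (h2 : i ≤ hi)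
    (h3 : 2 * i ≤ cs.length) (h : pvFirstJ cs i = some j) :
    pvValid cs lo hi (j + 2 * i) i := by
  unfold pvFirstJ at h
  have hj : j < cs.length - 2 * i + 1 := List.mem_range.mp (List.mem_of_find?_eq_some h)
  have hp := List.find?_some h
  refine ⟨h1, h2, by omega, by omega, ?_⟩
  have hjj : j + 2 * i - 2 * i = j := by omega
  rw [hjj]
  exact hp

-- the core bridge on lists of length ≥ 3: A's fold state equals B's lexicographic search
theorem pv_core (cs : List Char) (h3 : 3 ≤ cs.length) :
    ((List.range' (cs.length / 3) (cs.length / 2 + 1 - cs.length / 3)).foldl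
        (fun st i => pvInnerA cs i (List.range (cs.length - 2 * i + 1)) st)
        ((none, none) : Option Nat × Option Nat)).2
      = pvFindEB cs (List.range' (max 1 (cs.length / 3)) (cs.length / 2 + 1 - max 1 (cs.length / 3)))
          (List.range' (2 * max 1 (cs.length / 3)) (cs.length + 1 - 2 * max 1 (cs.length / 3))) := by
  have hlo1 : 1 ≤ cs.length / 3 := by omega
  have hlohi : cs.length / 3 ≤ cs.length / 2 := by omega
  have h2hi : 2 * (cs.length / 2) ≤ cs.length := by omega
  rw [Nat.max_eq_right hlo1]
  rw [show ((none, none) : Option Nat × Option Nat) = pvPack none from rfl, pvFold_eq_combine]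
  rw [pvFindEB_eq_findSome?]
  by_cases hex : ∃ E i, pvValid cs (cs.length / 3) (cs.length / 2) E i
  · classical
    obtain E0def : True := trivial
    have hE0ex : ∃ i, pvValid cs (cs.length / 3) (cs.length / 2) (Nat.find hex) i := Nat.find_spec hex
    set E0 := Nat.find hex with hE0
    set i0 := Nat.find hE0ex with hi0
    have hval : pvValid cs (cs.length / 3) (cs.length / 2) E0 i0 := Nat.find_spec hE0ex
    obtain ⟨hv1, hv2, hv3, hv4, hv5⟩ := hval
    -- B computes some (E0 - i0)
    have hB : (List.range' (2 * (cs.length / 3)) (cs.length + 1 - 2 * (cs.length / 3))).findSome?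
        (fun E => pvFindIB cs E (List.range' (cs.length / 3) (cs.length / 2 + 1 - cs.length / 3)))
        = some (E0 - i0) := by
      apply pvFindSome?_range'_eq_some _ (E := E0) (E0 - i0) (by omega) (by omega)
      · rw [pvFindIB_eq_find?]
        rw [pvFind?_range'_eq_some hv1 (by omega) (decide_eq_true ⟨hv3, of_decide_eq_true hv5⟩) ?_]
        · rfl
        · intro k hk1 hk2
          apply decide_eq_false
          rintro ⟨hc1, hc2⟩
          exact Nat.find_min hE0ex hk2 ⟨hk1, by omega, hc1, hv4, decide_eq_true hc2⟩
      · intro E' hE'1 hE'2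
        rw [pvFindIB_eq_find?, List.find?_eq_none.mpr ?_]
        · rfl
        · intro i hi hcond
          rcases List.mem_range'_1.mp hi with ⟨hi1, hi2⟩
          obtain ⟨hc1, hc2⟩ := of_decide_eq_true hcond
          exact Nat.find_min hex hE'2 ⟨i, hi1, by omega, hc1, by omega, decide_eq_true hc2⟩
    rw [hB]
    -- A's candidate list splits at i0
    have hfj : pvFirstJ cs i0 = some (E0 - 2 * i0) := by
      obtain ⟨j0, hj0, hj0le⟩ := pvFirstJ_le cs (cs.length / 3) (cs.length / 2) E0 i0
        ⟨hv1, hv2, hv3, hv4, hv5⟩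
      have hvj := pvFirstJ_valid cs (cs.length / 3) (cs.length / 2) i0 j0 hv1 hv2 (by omega) hj0
      have hge : E0 ≤ j0 + 2 * i0 := Nat.find_min' hex ⟨i0, hvj⟩
      have : j0 = E0 - 2 * i0 := by omega
      rw [← this]; exact hj0
    have hsplit : List.range' (cs.length / 3) (cs.length / 2 + 1 - cs.length / 3)
        = List.range' (cs.length / 3) (i0 - cs.length / 3)
          ++ i0 :: List.range' (i0 + 1) (cs.length / 2 - i0) := by
      have happ := List.range'_append (s := cs.length / 3) (m := i0 - cs.length / 3)
        (n := cs.length / 2 + 1 - i0) (step := 1)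
      have h1 : cs.length / 3 + 1 * (i0 - cs.length / 3) = i0 := by omega
      have h2 : i0 - cs.length / 3 + (cs.length / 2 + 1 - i0) = cs.length / 2 + 1 - cs.length / 3 := by omega
      have h3' : cs.length / 2 + 1 - i0 = (cs.length / 2 - i0) + 1 := by omega
      rw [h1, h2] at happ
      rw [← happ, h3', List.range'_succ]
    rw [hsplit]
    unfold pvCand
    rw [List.filterMap_append, List.filterMap_cons]
    rw [hfj]
    simp only [Option.map_some]
    have hmid : E0 - 2 * i0 + 2 * i0 = E0 := by omega
    rw [hmid]
    rw [pvCombine_first_min]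
    · simp only [pvPack]
    · -- every earlier candidate ends strictly later
      intro q hq
      obtain ⟨i, hi, hfi⟩ := List.mem_filterMap.mp hq
      rcases List.mem_range'_1.mp hi with ⟨hi1, hi2⟩
      have hii0 : i < i0 := by omega
      obtain ⟨j, hj, hjq⟩ := Option.map_eq_some_iff.mp hfi
      have hvj := pvFirstJ_valid cs (cs.length / 3) (cs.length / 2) i j hi1 (by omega) (by omega) hj
      have hge : E0 ≤ j + 2 * i := Nat.find_min' hex ⟨i, hvj⟩
      rcases Nat.lt_or_ge E0 (j + 2 * i) with hlt | hle
      · rw [← hjq]; exact hlt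
      · exfalso
        have heq : j + 2 * i = E0 := by omega
        rw [heq] at hvj
        exact Nat.find_min hE0ex hii0 hvj
    · -- every later candidate ends no earlier
      intro q hq
      obtain ⟨i, hi, hfi⟩ := List.mem_filterMap.mp hq
      rcases List.mem_range'_1.mp hi with ⟨hi1, hi2⟩
      obtain ⟨j, hj, hjq⟩ := Option.map_eq_some_iff.mp hfi
      have hvj := pvFirstJ_valid cs (cs.length / 3) (cs.length / 2) i j (by omega) (by omega) (by omega) hj
      have hge : E0 ≤ j + 2 * i := Nat.find_min' hex ⟨i, hvj⟩
      rw [← hjq]; exact hge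
  · -- no repeat anywhere: both sides return none
    have hcand : pvCand cs (List.range' (cs.length / 3) (cs.length / 2 + 1 - cs.length / 3)) = [] := by
      apply List.filterMap_eq_nil_iff.mpr
      intro i hi
      cases hf : pvFirstJ cs i with
      | none => rfl
      | some j =>
        exfalso
        rcases List.mem_range'_1.mp hi with ⟨hi1, hi2⟩
        exact hex ⟨j + 2 * i, i, pvFirstJ_valid cs _ _ i j hi1 (by omega) (by omega) hf⟩
    rw [hcand]
    simp only [List.foldl_nil, pvPack]
    symm
    rw [List.findSome?_eq_none_iff]
    intro E hE
    rw [pvFindIB_eq_find?, List.find?_eq_none.mpr ?_]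
    · rfl
    · intro i hi hcond
      rcases List.mem_range'_1.mp hi with ⟨hi1, hi2⟩
      rcases List.mem_range'_1.mp hE with ⟨hE1, hE2⟩
      obtain ⟨hc1, hc2⟩ := of_decide_eq_true hcond
      exact hex ⟨E, i, hi1, by omega, hc1, by omega, decide_eq_true hc2⟩

-- the main bridge outside D_: lengths 0 and ≥ 3
theorem pv_main (text : String) (hn : ¬ D_remove_repetitive_text text) :
    remove_repetitive_text text = remove_repetitive_text_alt text := by
  have hlen : PySem.Str.len text = (text.toList.length : Int) := by simp [PySem.Str.len_eq]
  unfold D_remove_repetitive_text at hn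
  rw [hlen] at hn
  simp only [not_or] at hn
  have hcase : text.toList.length = 0 ∨ 3 ≤ text.toList.length := by omega
  rcases hcase with h0 | h3
  · have hnil : text.toList = [] := List.length_eq_zero_iff.mp h0
    have htext : text = "" := by
      rw [← String.ofList_toList (s := text), hnil]
    rw [htext]; decide
  · have h := pv_core text.toList h3
    unfold remove_repetitive_text remove_repetitive_text_alt
    simp only []
    rw [h]

-- ===== VERDICT (by name: the statement is the Claim_ definition above) =====
theorem remove_repetitive_text_spec : Claim_unchanged_remove_repetitive_text := by
  intro text _ hD
  exact pv_main text hD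

theorem remove_repetitive_text_changed : Claim_changed_remove_repetitive_text := by
  unfold Claim_changed_remove_repetitive_text; decide

theorem remove_repetitive_text_tight : Claim_exact_remove_repetitive_text := by
  unfold Claim_exact_remove_repetitive_text
  intro text _ hD
  have hlen : PySem.Str.len text = (text.toList.length : Int) := by simp [PySem.Str.len_eq]
  unfold D_remove_repetitive_text at hD
  rw [hlen] at hD
  have hl : text.toList.length = 1 ∨ text.toList.length = 2 := by omega
  have htext : text = String.ofList text.toList := (String.ofList_toList).symm
  rcases hl with h1 | h2
  · obtain ⟨c, hc⟩ := List.length_eq_one_iff.mp h1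
    rw [htext, hc]
    have hA : remove_repetitive_text (String.ofList [c]) = String.ofList [] := by
      unfold remove_repetitive_text
      rw [String.toList_ofList]
      norm_num
      show (match (pvInnerA [c] 0 [0, 1] ((none : Option Nat), (none : Option Nat))).2 with
            | some r => String.ofList (List.take r [c])
            | none => String.ofList [c]) = String.ofList []
      rfl
    have hB : remove_repetitive_text_alt (String.ofList [c]) = String.ofList [c] := by
      unfold remove_repetitive_text_alt
      rw [String.toList_ofList]
      norm_num
      rfl
    intro he
    rw [hA, hB] at he
    have := congrArg String.toList he
    simp at this
  · obtain ⟨c, d, hc⟩ := List.length_eq_two.mp h2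
    rw [htext, hc]
    have hA : remove_repetitive_text (String.ofList [c, d]) = String.ofList [] := by
      unfold remove_repetitive_text
      rw [String.toList_ofList]
      norm_num
      show (match (pvInnerA [c, d] 1 [0]
              (pvInnerA [c, d] 0 [0, 1, 2] ((none : Option Nat), (none : Option Nat)))).2 with
            | some r => String.ofList (List.take r [c, d])
            | none => String.ofList [c, d]) = String.ofList []
      by_cases hcd : c = d
      · subst hcd; simp [pvInnerA, pvLtA]
      · simp [pvInnerA, pvLtA, hcd]
    have hB : remove_repetitive_text_alt (String.ofList [c, d])
        = if c = d then String.ofList [c] else String.ofList [c, d] := by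
      unfold remove_repetitive_text_alt
      rw [String.toList_ofList]
      norm_num
      show (match pvFindEB [c, d] [1] [2] with
            | some r => String.ofList (List.take r [c, d])
            | none => String.ofList [c, d])
          = if c = d then String.ofList [c] else String.ofList [c, d]
      by_cases hcd : c = d
      · subst hcd; simp [pvFindEB, pvFindIB]
      · simp [pvFindEB, pvFindIB, hcd]
    intro he
    rw [hA, hB] at he
    by_cases hcd : c = d
    · rw [if_pos hcd] at he
      have := congrArg String.toList he
      simp at this
    · rw [if_neg hcd] at he
      have := congrArg String.toList he
      simp at this
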